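-- pv_equiv track=rewrite | github.com/HappynessI/verl-for-AgentGym | data/textcraft/entropy_based_prefix/scripts/06_replay_validate_entropy_candidates.py | extract_observation_fields
-- ===== SOURCE A (Python) =====
-- from typing import Any, Dict, List, Optional, Tuple
--
-- def extract_observation_fields(text: str) -> Dict[str, str]:
--     fields: Dict[str, str] = {}
--     if not text:
--         return fields
--
--     for prefix, key in (
--         ("Inventory:", "inventory"),
--         ("Got ", "got"),
--         ("Crafted ", "crafted"),
--     ):
--         for line in text.splitlines():
--             stripped = line.strip()
--             if stripped.startswith(prefix):
--                 fields[key] = stripped[len(prefix) :].strip()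
--                 break
--     return fields
-- ===== SOURCE B (Python) =====
-- def extract_observation_fields(text: str):
--     # One pass over the lines, filling all three fields together (first match wins).
--     inv = got = crafted = None
--     for line in text.splitlines():
--         s = line.strip()
--         if inv is None and s.startswith("Inventory:"):
--             inv = s[len("Inventory:"):].strip()
--         if got is None and s.startswith("Got "):
--             got = s[len("Got "):].strip()
--         if crafted is None and s.startswith("Crafted "):
--             crafted = s[len("Crafted "):].strip()
--     fields = {}
--     if inv is not None:
--         fields["inventory"] = inv
--     if got is not None:
--         fields["got"] = got
--     if crafted is not None:
--         fields["crafted"] = crafted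
--     return fields
-- ===== Notes on version B (the rewrite author's own statement) =====
-- stated objective: simpler
-- what changed: Replaces three full rescans of the line list (one per prefix, with break) by a single pass that fills three optional slots (first match wins) and assembles the dict afterwards in the fixed key order.
import Mathlib
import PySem

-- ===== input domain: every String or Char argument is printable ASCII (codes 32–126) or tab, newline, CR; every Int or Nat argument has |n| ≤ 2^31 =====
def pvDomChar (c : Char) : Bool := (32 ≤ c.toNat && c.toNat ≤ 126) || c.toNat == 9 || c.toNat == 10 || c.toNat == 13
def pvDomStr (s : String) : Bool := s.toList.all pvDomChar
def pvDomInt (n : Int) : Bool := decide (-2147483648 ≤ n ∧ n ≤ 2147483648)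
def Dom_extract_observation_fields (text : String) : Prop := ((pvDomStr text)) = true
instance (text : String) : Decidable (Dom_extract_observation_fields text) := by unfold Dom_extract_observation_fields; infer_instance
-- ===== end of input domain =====

-- B replaces A's three full rescans of the lines (one per prefix, with break) by a single
-- pass filling three optional slots, assembled afterwards in the fixed key order (simpler).

-- ===== PORT A =====
-- inner 'for line in ...: ... break' loop of A, for one (prefix, key) pair
def eofInnerA (fields : PySem.Dict String String) (pre key : String) : List String → PySem.Dict String String
  | [] => fields
  | line :: rest =>
    let stripped := PySem.Str.strip line
    if PySem.Str.startswith stripped pre then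
      fields.insert key (PySem.Str.strip (PySem.Str.slice stripped (some (PySem.Str.len pre : Int)) none))
    else eofInnerA fields pre key rest

def extract_observation_fields (text : String) : List (String × String) :=
  let fields : PySem.Dict String String := PySem.Dict.empty
  if text = "" then fields.items
  else
    (([("Inventory:", "inventory"), ("Got ", "got"), ("Crafted ", "crafted")] : List (String × String)).foldl
      (fun fields pk => eofInnerA fields pk.1 pk.2 (PySem.Str.splitlines text)) fields).items

-- ===== PORT B =====
-- one step of B's single pass: update each empty slot whose prefix matches the stripped line
def eofStepB (acc : Option String × Option String × Option String) (line : String) :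
    Option String × Option String × Option String :=
  let s := PySem.Str.strip line
  let inv := if acc.1 = none ∧ PySem.Str.startswith s "Inventory:" then
      some (PySem.Str.strip (PySem.Str.slice s (some (PySem.Str.len "Inventory:" : Int)) none)) else acc.1
  let got := if acc.2.1 = none ∧ PySem.Str.startswith s "Got " then
      some (PySem.Str.strip (PySem.Str.slice s (some (PySem.Str.len "Got " : Int)) none)) else acc.2.1
  let cra := if acc.2.2 = none ∧ PySem.Str.startswith s "Crafted " then
      some (PySem.Str.strip (PySem.Str.slice s (some (PySem.Str.len "Crafted " : Int)) none)) else acc.2.2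
  (inv, got, cra)

def extract_observation_fields_alt (text : String) : List (String × String) :=
  let r := (PySem.Str.splitlines text).foldl eofStepB (none, none, none)
  (match r.1 with | some v => [("inventory", v)] | none => []) ++
  (match r.2.1 with | some v => [("got", v)] | none => []) ++
  (match r.2.2 with | some v => [("crafted", v)] | none => [])

-- ===== PRECONDITION & SPEC =====
def Spec_extract_observation_fields (text : String) (out : List (String × String)) : Prop := out = extract_observation_fields_alt text
instance (text : String) (out : List (String × String)) : Decidable (Spec_extract_observation_fields text out) := by unfold Spec_extract_observation_fields; infer_instance

-- ===== CLAIM (what is proved, stated in full; the proofs are below) =====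
def Claim_equal_extract_observation_fields : Prop := ∀ (text : String), Dom_extract_observation_fields text → Spec_extract_observation_fields text (extract_observation_fields text)

-- ===== LEMMAS AND PROOFS =====

-- the value A's inner loop would insert for prefix p: first stripped line starting with p, suffix stripped
def eofFind (p : String) : List String → Option String
  | [] => none
  | line :: rest =>
    let s := PySem.Str.strip line
    if PySem.Str.startswith s p then
      some (PySem.Str.strip (PySem.Str.slice s (some (PySem.Str.len p : Int)) none))
    else eofFind p rest

theorem eofInnerA_eq_find (fields : PySem.Dict String String) (pre key : String) (lines : List String) :
    eofInnerA fields pre key lines =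
      match eofFind pre lines with
      | none => fields
      | some v => fields.insert key v := by
  induction lines with
  | nil => rfl
  | cons l rest ih =>
    simp only [eofInnerA, eofFind]
    split_ifs with h
    · rfl
    · exact ih

theorem eofFoldB_eq_find (lines : List String) (a b c : Option String) :
    lines.foldl eofStepB (a, b, c) =
      (a.or (eofFind "Inventory:" lines), b.or (eofFind "Got " lines), c.or (eofFind "Crafted " lines)) := by
  induction lines generalizing a b c with
  | nil => simp [eofFind]
  | cons l rest ih =>
    simp only [List.foldl_cons, eofStepB, eofFind]
    rw [ih]
    cases a <;> cases b <;> cases c <;> simp <;> split_ifs <;> simp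

-- ===== VERDICT (by name: the statement is the Claim_ definition above) =====
theorem extract_observation_fields_spec : Claim_equal_extract_observation_fields := by
  intro text _
  show extract_observation_fields text = extract_observation_fields_alt text
  by_cases htext : text = ""
  · subst htext; decide
  · unfold extract_observation_fields extract_observation_fields_alt
    simp only [if_neg htext, List.foldl_cons, List.foldl_nil]
    rw [eofFoldB_eq_find]
    rw [eofInnerA_eq_find, eofInnerA_eq_find, eofInnerA_eq_find]
    rcases h1 : eofFind "Inventory:" (PySem.Str.splitlines text) with _ | v1 <;>
    rcases h2 : eofFind "Got " (PySem.Str.splitlines text) with _ | v2 <;>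
    rcases h3 : eofFind "Crafted " (PySem.Str.splitlines text) with _ | v3 <;>
      simp [PySem.Dict.insert, PySem.Dict.empty]
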